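-- pv_equiv track=rewrite | github.com/michellechena/Python | Lists/Lists/hw0_1.py | skip13s
-- ===== SOURCE A (Python) =====
-- def skip13s(l):
--     i = 0
--     s = 0
--     while (i < len(l)):
--         if l[i] == 13:
--             i += 1
--         else:
--             s += l[i]
--         i += 1
--     return s
-- ===== SOURCE B (Python) =====
-- def skip13s(l):
--     s = 0
--     skip = False
--     for x in l:
--         if skip:
--             skip = False
--         elif x == 13:
--             skip = True
--         else:
--             s += x
--     return s
-- ===== Notes on version B (the rewrite author's own statement) =====
-- stated objective: idiomatic
-- what changed: Replaces the index-jumping while loop (i += 2 after a 13) with a single for-loop over the elements that threads a boolean skip flag.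
import Mathlib
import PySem

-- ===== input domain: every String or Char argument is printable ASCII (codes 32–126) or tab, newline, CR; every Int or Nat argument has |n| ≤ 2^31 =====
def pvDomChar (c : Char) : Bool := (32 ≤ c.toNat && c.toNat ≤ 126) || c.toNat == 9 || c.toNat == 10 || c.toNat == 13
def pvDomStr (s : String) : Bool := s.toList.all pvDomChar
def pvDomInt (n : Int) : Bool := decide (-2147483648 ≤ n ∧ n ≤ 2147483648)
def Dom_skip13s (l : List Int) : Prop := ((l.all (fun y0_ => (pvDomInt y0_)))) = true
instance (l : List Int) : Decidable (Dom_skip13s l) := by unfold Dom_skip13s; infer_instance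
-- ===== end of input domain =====

-- B replaces A's index-jumping while loop with a for-loop threading a boolean skip flag (idiomatic; same cost).


-- ===== PORT A =====
-- A's while loop over index i; l[i] is always in range when read (guarded by i < len(l)).
def skip13sLoop (l : List Int) (i : Nat) (s : Int) : Int :=
  if h : i < l.length then
    if l[i] = 13 then skip13sLoop l (i + 2) s
    else skip13sLoop l (i + 1) (s + l[i])
  else s
termination_by l.length - i

def skip13s (l : List Int) : Int := skip13sLoop l 0 0

-- ===== PORT B =====
def skip13sStep (st : Int × Bool) (x : Int) : Int × Bool :=
  if st.2 then (st.1, false)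
  else if x = 13 then (st.1, true)
  else (st.1 + x, false)

def skip13s_alt (l : List Int) : Int := (l.foldl skip13sStep (0, false)).1

-- ===== PRECONDITION & SPEC =====
def Spec_skip13s (l : List Int) (out : Int) : Prop := out = skip13s_alt l
instance (l : List Int) (out : Int) : Decidable (Spec_skip13s l out) := by unfold Spec_skip13s; infer_instance

-- ===== CLAIM (what is proved, stated in full; the proofs are below) =====
def Claim_equal_skip13s : Prop := ∀ (l : List Int), Dom_skip13s l → Spec_skip13s l (skip13s l)

-- ===== LEMMAS AND PROOFS =====

theorem skip13sLoop_eq (l : List Int) (i : Nat) (s : Int) :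
    skip13sLoop l i s = ((l.drop i).foldl skip13sStep (s, false)).1 := by
  by_cases h : i < l.length
  · rw [skip13sLoop]
    rw [List.drop_eq_getElem_cons h]
    simp only [h, dif_pos, List.foldl_cons, skip13sStep]
    by_cases h13 : l[i] = 13
    · simp only [h13, if_pos]
      by_cases h2 : i + 1 < l.length
      · rw [List.drop_eq_getElem_cons h2]
        simp only [List.foldl_cons, skip13sStep]
        have := skip13sLoop_eq l (i + 2) s
        simpa using this
      · have hd1 : l.drop (i + 1) = [] := List.drop_eq_nil_of_le (by omega)
        have hd2 : l.drop (i + 2) = [] := List.drop_eq_nil_of_le (by omega)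
        rw [skip13sLoop]
        simp [hd1, show ¬ (i + 2 < l.length) by omega]
    · have := skip13sLoop_eq l (i + 1) (s + l[i])
      simp [h13, this]
  · have hd : l.drop i = [] := List.drop_eq_nil_of_le (by omega)
    rw [skip13sLoop]
    simp [h, hd]
termination_by l.length - i

-- ===== VERDICT (by name: the statement is the Claim_ definition above) =====
theorem skip13s_spec : Claim_equal_skip13s := by
  intro l _
  unfold Spec_skip13s skip13s skip13s_alt
  simpa using skip13sLoop_eq l 0 0
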